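-- pv_equiv track=rewrite | github.com/pypi-data/pypi-mirror-333 | packages/lhachimi/lhachimi-0.1.261-py3-none-any.whl/lhachimi/__init__.py | log_p
-- ===== SOURCE A (Python) =====
-- import math as m
--
-- def log_p(x, N):
--     if N < 1:
--         return (0, 1)
--     a, b = 0, 1
--     tn, td = x-1, 1
--     for n in range(1, N+1):
--         a = a * td + tn * b
--         b *= td
--         g = m.gcd(abs(a), b)
--         a, b = a//g, b//g
--         if n < N:
--             tn *= -x+1
--             td = n + 1
--     return (a, b)
-- ===== SOURCE B (Python) =====
-- import math as m
--
-- def log_p(x, N):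
--     # binary splitting of the Mercator partial sum; one gcd reduction at the end
--     if N < 1:
--         return (0, 1)
--     c = x - 1
--
--     def split(lo, hi):
--         # returns (p, q, e) with p/q = sum_{n=lo}^{hi} (-c)^(n-lo)/n (unreduced),
--         # q = lo*(lo+1)*...*hi, e = (-c)^(hi-lo+1)
--         if lo == hi:
--             return (1, lo, -c)
--         mid = (lo + hi) // 2
--         p1, q1, e1 = split(lo, mid)
--         p2, q2, e2 = split(mid + 1, hi)
--         return (p1 * q2 + e1 * p2 * q1, q1 * q2, e1 * e2)
--
--     p, q, _ = split(1, N)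
--     p *= c
--     g = m.gcd(abs(p), q)
--     return (p // g, q // g)
-- ===== Notes on version B (the rewrite author's own statement) =====
-- stated objective: faster
-- what changed: Replaces the per-term loop that gcd-reduces the running fraction at every step with binary splitting of the term sum (carrying numerator, denominator product and the signed power of (x-1) up the recursion tree) followed by a single final gcd reduction.
import Mathlib
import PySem

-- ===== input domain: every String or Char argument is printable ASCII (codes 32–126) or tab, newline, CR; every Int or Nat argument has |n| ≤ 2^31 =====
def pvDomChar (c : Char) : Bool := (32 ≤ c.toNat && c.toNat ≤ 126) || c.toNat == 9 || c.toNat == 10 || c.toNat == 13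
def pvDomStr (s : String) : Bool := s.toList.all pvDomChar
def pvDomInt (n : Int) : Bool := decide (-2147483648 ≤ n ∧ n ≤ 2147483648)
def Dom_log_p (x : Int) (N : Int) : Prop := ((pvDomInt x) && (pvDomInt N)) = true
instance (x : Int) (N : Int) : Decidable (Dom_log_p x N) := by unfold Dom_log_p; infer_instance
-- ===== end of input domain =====

-- B replaces A's per-term loop (gcd reduction of the running fraction at every step) by binary
-- splitting of the Mercator term sum with one final gcd reduction; measured asymptotically faster.

-- ===== PORT A =====
-- one loop iteration of A (state = (a, b, tn, td)); math.gcd(abs(a), b) is Int.gcd a b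
def stepA (x N : Int) (st : Int × Int × Int × Int) (n : Int) : Int × Int × Int × Int :=
  let a := st.1 * st.2.2.2 + st.2.2.1 * st.2.1
  let b := st.2.1 * st.2.2.2
  let g : Int := Int.gcd a b
  let a := PySem.Int.floordiv a g
  let b := PySem.Int.floordiv b g
  if n < N then (a, b, st.2.2.1 * (-x + 1), n + 1) else (a, b, st.2.2.1, st.2.2.2)

def log_p (x : Int) (N : Int) : List Int :=
  if N < 1 then [0, 1]
  else
    let s := (PySem.List.pyRange 1 (N + 1) 1).foldl (stepA x N) (0, 1, x - 1, 1)
    [s.1, s.2.1]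

-- ===== PORT B =====
-- split(lo, hi) of Source B: returns (p, q, e); the Python base case is lo == hi (only called with
-- lo ≤ hi, so the dichotomy ¬lo < hi ↔ lo = hi is the same test there)
def bsplit (c lo hi : Int) : Int × Int × Int :=
  if h : lo < hi then
    let mid := PySem.Int.floordiv (lo + hi) 2
    have hb := PySem.Int.floordiv_two_mid_bounds (lo := lo) (hi := hi) (le_of_lt h)
    have hmlt : PySem.Int.floordiv (lo + hi) 2 < hi := by
      rw [PySem.Int.floordiv_lt_iff_lt_mul (by omega : (0:Int) < 2)]; omega
    let r1 := bsplit c lo mid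
    let r2 := bsplit c (mid + 1) hi
    (r1.1 * r2.2.1 + r1.2.2 * r2.1 * r1.2.1, r1.2.1 * r2.2.1, r1.2.2 * r2.2.2)
  else (1, lo, -c)
termination_by (hi - lo).toNat
decreasing_by
  · omega
  · omega

def log_p_alt (x : Int) (N : Int) : List Int :=
  if N < 1 then [0, 1]
  else
    let c := x - 1
    let r := bsplit c 1 N
    let p := r.1 * c
    let g : Int := Int.gcd p r.2.1
    [PySem.Int.floordiv p g, PySem.Int.floordiv r.2.1 g]

-- ===== PRECONDITION & SPEC =====
def Spec_log_p (x : Int) (N : Int) (out : List Int) : Prop := out = log_p_alt x N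
instance (x : Int) (N : Int) (out : List Int) : Decidable (Spec_log_p x N out) := by unfold Spec_log_p; infer_instance

-- ===== CLAIM (what is proved, stated in full; the proofs are below) =====
def Claim_equal_log_p : Prop := ∀ (x : Int) (N : Int), Dom_log_p x N → Spec_log_p x N (log_p x N)

-- ===== LEMMAS AND PROOFS =====

-- Tsum c lo k = ∑_{i<k} (-c)^i / (lo+i), the tail sums both programs compute
def Tsum (c : ℚ) (lo : Int) : Nat → ℚ
  | 0 => 0
  | Nat.succ k => 1 / (lo : ℚ) + (-c) * Tsum c (lo + 1) k

theorem Tsum_add (c : ℚ) (m : Nat) : ∀ (lo : Int) (n : Nat),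
    Tsum c lo (m + n) = Tsum c lo m + (-c) ^ m * Tsum c (lo + (m : Int)) n := by
  induction m with
  | zero => intro lo n; simp [Tsum]
  | succ m ih =>
      intro lo n
      have : m + 1 + n = (m + n) + 1 := by omega
      rw [this]
      show 1 / (lo : ℚ) + (-c) * Tsum c (lo + 1) (m + n) = _
      rw [ih (lo + 1) n]
      have hcast : ((lo + 1 : Int) : ℚ) + (m : ℚ) = ((lo + ((m : Nat) + 1 : Int)) : ℚ) := by
        push_cast; ring
      show _ = (1 / (lo : ℚ) + (-c) * Tsum c (lo + 1) m) + (-c) ^ (m + 1) * Tsum c (lo + ((m : Nat) + 1 : Int)) n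
      rw [show ((lo + ((m:Nat) + 1 : Int))) = ((lo + 1) + (m : Int)) by omega]
      ring

theorem Tsum_succ (c : ℚ) (lo : Int) (k : Nat) :
    Tsum c lo (k + 1) = Tsum c lo k + (-c) ^ k * (1 / ((lo : ℚ) + (k : ℚ))) := by
  rw [Tsum_add c k lo 1]
  simp [Tsum]

-- positivity of the gcd used for reduction
theorem gcd_pos_right (a b : Int) (hb : 0 < b) : 0 < (Int.gcd a b : Int) := by
  exact_mod_cast Nat.pos_of_ne_zero (fun h => (ne_of_gt hb) (Int.gcd_eq_zero_iff.mp h).2)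

-- reducing a positive-denominator fraction by its gcd: positivity, coprimality, same value
theorem reduce_ratio (a b : Int) (hb : 0 < b) :
    0 < b / (Int.gcd a b : Int) ∧ Int.gcd (a / (Int.gcd a b : Int)) (b / (Int.gcd a b : Int)) = 1 ∧
      ((a / (Int.gcd a b : Int) : Int) : ℚ) / ((b / (Int.gcd a b : Int) : Int) : ℚ) = (a : ℚ) / (b : ℚ) := by
  have hcop : Int.gcd (a / (Int.gcd a b : Int)) (b / (Int.gcd a b : Int)) = 1 :=
    Int.gcd_div_gcd_div_gcd (by exact_mod_cast gcd_pos_right a b hb)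
  set g : Int := (Int.gcd a b : Int) with hgd
  have hg : 0 < g := gcd_pos_right a b hb
  have hgne : g ≠ 0 := ne_of_gt hg
  obtain ⟨ta, hta⟩ : g ∣ a := Int.gcd_dvd_left a b
  obtain ⟨tb, htb⟩ : g ∣ b := Int.gcd_dvd_right a b
  have hda : a / g = ta := by rw [hta]; exact Int.mul_ediv_cancel_left ta hgne
  have hdb : b / g = tb := by rw [htb]; exact Int.mul_ediv_cancel_left tb hgne
  have htbpos : 0 < tb := by
    have h0 : 0 < g * tb := htb ▸ hb
    rcases mul_pos_iff.mp h0 with ⟨_, h⟩ | ⟨h, _⟩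
    · exact h
    · omega
  refine ⟨by rw [hdb]; exact htbpos, hcop, ?_⟩
  rw [hda, hdb, hta, htb]
  have h1 : (tb : ℚ) ≠ 0 := by exact_mod_cast ne_of_gt htbpos
  have h2 : (g : ℚ) ≠ 0 := by exact_mod_cast hgne
  push_cast
  field_simp

-- uniqueness of the reduced representation
theorem reduced_unique (a1 b1 a2 b2 : Int) (h1 : 0 < b1) (h2 : 0 < b2)
    (c1 : Int.gcd a1 b1 = 1) (c2 : Int.gcd a2 b2 = 1)
    (hv : (a1 : ℚ) / (b1 : ℚ) = (a2 : ℚ) / (b2 : ℚ)) : a1 = a2 ∧ b1 = b2 := by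
  have hb1 : (b1 : ℚ) ≠ 0 := by exact_mod_cast ne_of_gt h1
  have hb2 : (b2 : ℚ) ≠ 0 := by exact_mod_cast ne_of_gt h2
  have hcross : a1 * b2 = a2 * b1 := by
    field_simp at hv
    have : a1 * b2 = b1 * a2 := by exact_mod_cast hv
    linarith
  have cop1 : IsCoprime b1 a1 := (Int.isCoprime_iff_gcd_eq_one.mpr c1).symm
  have cop2 : IsCoprime b2 a2 := (Int.isCoprime_iff_gcd_eq_one.mpr c2).symm
  have d12 : b1 ∣ b2 := cop1.dvd_of_dvd_mul_left ⟨a2, by linarith⟩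
  have d21 : b2 ∣ b1 := cop2.dvd_of_dvd_mul_left ⟨a1, by linarith⟩
  have hbeq : b1 = b2 := Int.dvd_antisymm (le_of_lt h1) (le_of_lt h2) d12 d21
  refine ⟨?_, hbeq⟩
  have : a1 * b2 = a2 * b2 := by rw [hcross, hbeq]
  exact mul_right_cancel₀ (ne_of_gt h2) this

-- one guarded iteration of A preserves the invariant
theorem stepA_step (x N : Int) (k : Nat) (s : Int × Int × Int × Int)
    (hb : 0 < s.2.1)
    (hval : (s.1 : ℚ) / (s.2.1 : ℚ) = ((x : ℚ) - 1) * Tsum ((x : ℚ) - 1) 1 k)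
    (htn : s.2.2.1 = (x - 1) * (-(x - 1)) ^ k) (htd : s.2.2.2 = (k : Int) + 1) :
    0 < (stepA x N s ((k : Int) + 1)).2.1 ∧
    Int.gcd (stepA x N s ((k : Int) + 1)).1 (stepA x N s ((k : Int) + 1)).2.1 = 1 ∧
    ((stepA x N s ((k : Int) + 1)).1 : ℚ) / ((stepA x N s ((k : Int) + 1)).2.1 : ℚ) =
      ((x : ℚ) - 1) * Tsum ((x : ℚ) - 1) 1 (k + 1) ∧
    ((k : Int) + 1 < N →
      (stepA x N s ((k : Int) + 1)).2.2.1 = (x - 1) * (-(x - 1)) ^ (k + 1) ∧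
      (stepA x N s ((k : Int) + 1)).2.2.2 = ((k : Int) + 1) + 1) := by
  obtain ⟨a, b, tn, td⟩ := s
  dsimp at hb hval htn htd
  subst htn htd
  unfold stepA
  dsimp only
  set A' := a * ((k : Int) + 1) + (x - 1) * (-(x - 1)) ^ k * b with hA'
  set B' := b * ((k : Int) + 1) with hB'
  have hBpos : 0 < B' := mul_pos hb (by omega)
  have hg : 0 < (Int.gcd A' B' : Int) := gcd_pos_right _ _ hBpos
  have hred := reduce_ratio A' B' hBpos
  rw [PySem.Int.floordiv_eq_ediv_of_pos hg, PySem.Int.floordiv_eq_ediv_of_pos hg]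
  have hbq : (b : ℚ) ≠ 0 := by exact_mod_cast ne_of_gt hb
  have hkq : ((k : ℚ) + 1) ≠ 0 := by positivity
  have hv2 : ((A' : Int) : ℚ) / ((B' : Int) : ℚ) = ((x : ℚ) - 1) * Tsum ((x : ℚ) - 1) 1 (k + 1) := by
    rw [Tsum_succ, mul_add, ← hval, hA', hB']
    push_cast
    field_simp
    ring
  split_ifs with hlt
  · exact ⟨hred.1, hred.2.1, hred.2.2.trans hv2, fun _ => ⟨by rw [pow_succ]; ring, rfl⟩⟩
  · exact ⟨hred.1, hred.2.1, hred.2.2.trans hv2, fun hc => absurd hc hlt⟩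

-- invariant of A's fold
theorem foldA_inv (x N : Int) : ∀ (k : Nat), (k : Int) ≤ N →
    (fun s : Int × Int × Int × Int =>
      0 < s.2.1 ∧ Int.gcd s.1 s.2.1 = 1 ∧
      (s.1 : ℚ) / (s.2.1 : ℚ) = ((x : ℚ) - 1) * Tsum ((x : ℚ) - 1) 1 k ∧
      ((k : Int) < N → s.2.2.1 = (x - 1) * (-(x - 1)) ^ k ∧ s.2.2.2 = (k : Int) + 1))
    ((PySem.List.pyRange 1 ((k : Int) + 1) 1).foldl (stepA x N) (0, 1, x - 1, 1)) := by
  intro k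
  induction k with
  | zero =>
      intro _
      rw [show ((0 : Nat) : Int) + 1 = 1 from rfl, PySem.List.pyRange_one_eq_nil (by omega)]
      refine ⟨by norm_num, by norm_num, by norm_num [Tsum], fun _ => ⟨by norm_num, by norm_num⟩⟩
  | succ k ih =>
      intro hN
      have hlt : (k : Int) < N := by push_cast at hN; omega
      have hrange : PySem.List.pyRange 1 (((k + 1 : Nat) : Int) + 1) 1 =
          PySem.List.pyRange 1 ((k : Int) + 1) 1 ++ [(k : Int) + 1] := by
        rw [show (((k + 1 : Nat) : Int) + 1) = ((k : Int) + 1) + 1 by push_cast; ring]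
        exact PySem.List.pyRange_one_succ_right (by omega)
      rw [hrange, List.foldl_append]
      obtain ⟨hb, hcop, hval, htntd⟩ := ih (le_of_lt hlt)
      obtain ⟨htn, htd⟩ := htntd hlt
      have hstep := stepA_step x N k _ hb hval htn htd
      simp only [List.foldl_cons, List.foldl_nil]
      push_cast
      simpa using hstep

-- invariant of B's binary splitting
theorem bsplit_inv (c lo hi : Int) (h1 : 1 ≤ lo) (h2 : lo ≤ hi) :
    0 < (bsplit c lo hi).2.1 ∧
    (bsplit c lo hi).2.2 = (-c) ^ ((hi + 1 - lo).toNat) ∧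
    ((bsplit c lo hi).1 : ℚ) / ((bsplit c lo hi).2.1 : ℚ) = Tsum (c : ℚ) lo ((hi + 1 - lo).toNat) := by
  by_cases h : lo < hi
  · have hb := PySem.Int.floordiv_two_mid_bounds (lo := lo) (hi := hi) h2
    have hmlt : PySem.Int.floordiv (lo + hi) 2 < hi := by
      rw [PySem.Int.floordiv_lt_iff_lt_mul (by omega : (0:Int) < 2)]; omega
    set mid := PySem.Int.floordiv (lo + hi) 2 with hmid
    have i1 := bsplit_inv c lo mid h1 hb.1
    have i2 := bsplit_inv c (mid + 1) hi (by omega) (by omega)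
    have heq : bsplit c lo hi =
        ((bsplit c lo mid).1 * (bsplit c (mid + 1) hi).2.1 +
           (bsplit c lo mid).2.2 * (bsplit c (mid + 1) hi).1 * (bsplit c lo mid).2.1,
         (bsplit c lo mid).2.1 * (bsplit c (mid + 1) hi).2.1,
         (bsplit c lo mid).2.2 * (bsplit c (mid + 1) hi).2.2) := by
      rw [bsplit]; simp only [dif_pos h, ← hmid]
    obtain ⟨hq1, he1, hv1⟩ := i1
    obtain ⟨hq2, he2, hv2⟩ := i2
    rw [heq]
    dsimp only
    refine ⟨mul_pos hq1 hq2, ?_, ?_⟩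
    · rw [he1, he2, ← pow_add]
      congr 1
      omega
    · have hsplit : (hi + 1 - lo).toNat = (mid + 1 - lo).toNat + (hi + 1 - (mid + 1)).toNat := by
        omega
      rw [hsplit, Tsum_add]
      have hlo : lo + ((mid + 1 - lo).toNat : Int) = mid + 1 := by omega
      rw [hlo, ← hv1, ← hv2, he1]
      have hq1' : ((bsplit c lo mid).2.1 : ℚ) ≠ 0 := by exact_mod_cast ne_of_gt hq1
      have hq2' : ((bsplit c (mid + 1) hi).2.1 : ℚ) ≠ 0 := by exact_mod_cast ne_of_gt hq2
      push_cast
      field_simp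
  · have heq : bsplit c lo hi = (1, lo, -c) := by rw [bsplit]; simp only [dif_neg h]
    rw [heq]
    dsimp only
    have hn : (hi + 1 - lo).toNat = 1 := by omega
    refine ⟨by omega, by rw [hn, pow_one], by rw [hn]; simp [Tsum]⟩
termination_by (hi - lo).toNat
decreasing_by
  · simp only [hmid] at *; omega
  · simp only [hmid] at *; omega

-- ===== VERDICT (by name: the statement is the Claim_ definition above) =====
theorem log_p_spec : Claim_equal_log_p := by
  intro x N _
  unfold Spec_log_p log_p log_p_alt
  by_cases hN : N < 1
  · simp [hN]
  · simp only [hN, if_false]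
    have hN1 : 1 ≤ N := by omega
    have hkc : ((N.toNat : Nat) : Int) = N := by omega
    have hA := foldA_inv x N N.toNat (by omega)
    rw [hkc] at hA
    obtain ⟨hb, hcop, hval, -⟩ := hA
    have hB := bsplit_inv (x - 1) 1 N (le_refl 1) hN1
    obtain ⟨hq, -, hrval⟩ := hB
    have hq' : ((bsplit (x - 1) 1 N).2.1 : ℚ) ≠ 0 := by exact_mod_cast ne_of_gt hq
    have hg : 0 < (Int.gcd ((bsplit (x - 1) 1 N).1 * (x - 1)) (bsplit (x - 1) 1 N).2.1 : Int) :=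
      gcd_pos_right _ _ hq
    rw [PySem.Int.floordiv_eq_ediv_of_pos hg, PySem.Int.floordiv_eq_ediv_of_pos hg]
    have hred := reduce_ratio ((bsplit (x - 1) 1 N).1 * (x - 1)) (bsplit (x - 1) 1 N).2.1 hq
    have htw : ((N : Int) + 1 - 1).toNat = N.toNat := by omega
    rw [htw] at hrval
    have hval2 :
        ((((bsplit (x - 1) 1 N).1 * (x - 1)) / (Int.gcd ((bsplit (x - 1) 1 N).1 * (x - 1)) (bsplit (x - 1) 1 N).2.1 : Int) : Int) : ℚ) /
          (((bsplit (x - 1) 1 N).2.1 / (Int.gcd ((bsplit (x - 1) 1 N).1 * (x - 1)) (bsplit (x - 1) 1 N).2.1 : Int) : Int) : ℚ) =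
        ((x : ℚ) - 1) * Tsum ((x : ℚ) - 1) 1 N.toNat := by
      rw [hred.2.2]
      rw [show (((bsplit (x - 1) 1 N).1 * (x - 1) : Int) : ℚ) = ((x : ℚ) - 1) * ((bsplit (x - 1) 1 N).1 : ℚ) by push_cast; ring]
      rw [mul_div_assoc, hrval]
      push_cast
      ring
    have hfin := reduced_unique _ _ _ _ hb hred.1 hcop hred.2.1 (hval.trans hval2.symm)
    rw [hfin.1, hfin.2]
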